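-- pv_equiv track=rewrite | github.com/qiumuyang/NJU-FLA2020Autumn | pytest/testfull1.py | gen_full_testcase
-- ===== SOURCE A (Python) =====
-- def gen_full_testcase(length=10):
--     total = []
--     ret = ['a', 'b']
--     while len(ret[0]) < length:
--         total += ret.copy()
--         tmp = [s+c for s in ret for c in ['a', 'b']]
--         ret = tmp
--     total += ret.copy()
--     return total
-- ===== SOURCE B (Python) =====
-- import itertools
--
--
-- def gen_full_testcase(length=10):
--     return [''.join(p)
--             for n in range(1, max(length, 1) + 1)
--             for p in itertools.product('ab', repeat=n)]
-- ===== Notes on version B (the rewrite author's own statement) =====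
-- stated objective: idiomatic
-- what changed: A grows each layer from the previous one in a while loop with an explicit accumulator; B independently enumerates, for each n in range(1, max(length,1)+1), the Cartesian product itertools.product('ab', repeat=n) in one nested comprehension.
import Mathlib
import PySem

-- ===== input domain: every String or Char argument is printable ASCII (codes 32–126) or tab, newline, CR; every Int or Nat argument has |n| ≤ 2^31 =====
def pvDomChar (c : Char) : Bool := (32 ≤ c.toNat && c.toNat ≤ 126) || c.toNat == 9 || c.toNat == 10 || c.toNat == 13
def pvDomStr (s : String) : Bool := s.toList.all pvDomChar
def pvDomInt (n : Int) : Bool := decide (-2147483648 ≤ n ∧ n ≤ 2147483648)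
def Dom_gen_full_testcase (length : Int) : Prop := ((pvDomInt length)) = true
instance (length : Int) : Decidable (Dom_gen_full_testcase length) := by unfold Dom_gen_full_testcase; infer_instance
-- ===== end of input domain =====

-- B re-implements A by enumerating each length's Cartesian product independently
-- (itertools.product style) instead of A's layer-by-layer doubling; objective: idiomatic.

-- ===== PORT A =====
-- A's while loop: ret[0] starts with length 1 and grows by exactly 1 each iteration,
-- so the loop runs exactly (length - 1).toNat times; that count is the structural fuel.
def genLoopA : Nat → List String → List String → List String
  | 0, total, ret => total ++ ret
  | k+1, total, ret =>
      genLoopA k (total ++ ret) (ret.flatMap (fun s => ["a", "b"].map (fun c => s ++ c)))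

def gen_full_testcase (length : Int) : List String :=
  genLoopA (length - 1).toNat [] ["a", "b"]

-- ===== PORT B =====
-- itertools.product('ab', repeat=n): leftmost position varies slowest.
def prodAB : Nat → List (List Char)
  | 0 => [[]]
  | n+1 => "ab".toList.flatMap (fun c => (prodAB n).map (fun p => c :: p))

def gen_full_testcase_alt (length : Int) : List String :=
  (PySem.List.pyRange 1 (max length 1 + 1) 1).flatMap
    (fun n => (prodAB n.toNat).map (fun p => String.ofList p))

-- ===== PRECONDITION & SPEC =====
def Spec_gen_full_testcase (length : Int) (out : List String) : Prop := out = gen_full_testcase_alt length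
instance (length : Int) (out : List String) : Decidable (Spec_gen_full_testcase length out) := by unfold Spec_gen_full_testcase; infer_instance

-- ===== CLAIM (what is proved, stated in full; the proofs are below) =====
def Claim_equal_gen_full_testcase : Prop := ∀ (length : Int), Dom_gen_full_testcase length → Spec_gen_full_testcase length (gen_full_testcase length)

-- ===== LEMMAS AND PROOFS =====

-- the layer of all strings of length n, in the shared ('a' before 'b') order
def layer (n : Nat) : List String := (prodAB n).map (fun p => String.ofList p)

-- prepending the slow character (B's product) equals appending the fast one (A's step), at list level
theorem prodAB_succ_append (n : Nat) :
    prodAB (n+1) = (prodAB n).flatMap (fun p => [p ++ ['a'], p ++ ['b']]) := by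
  induction n with
  | zero => rfl
  | succ n ih =>
      calc prodAB (n+2)
          = "ab".toList.flatMap (fun c => (prodAB (n+1)).map (fun p => c :: p)) := rfl
        _ = "ab".toList.flatMap (fun c =>
              ((prodAB n).flatMap (fun p => [p ++ ['a'], p ++ ['b']])).map (fun p => c :: p)) := by
              rw [ih]
        _ = ("ab".toList.flatMap (fun c => (prodAB n).map (fun p => c :: p))).flatMap
              (fun p => [p ++ ['a'], p ++ ['b']]) := by
              simp [List.map_flatMap, List.flatMap_map]
        _ = (prodAB (n+1)).flatMap (fun p => [p ++ ['a'], p ++ ['b']]) := rfl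

theorem layer_step (n : Nat) :
    (layer n).flatMap (fun s => ["a", "b"].map (fun c => s ++ c)) = layer (n+1) := by
  rw [layer, layer, prodAB_succ_append]
  simp only [List.flatMap_map, List.map_flatMap]
  refine List.flatMap_congr (fun p _ => ?_)
  have ha : ("a" : String) = String.ofList ['a'] := rfl
  have hb : ("b" : String) = String.ofList ['b'] := rfl
  simp [ha, hb]

theorem genLoopA_layers (k : Nat) : ∀ (acc : List String) (n : Nat),
    genLoopA k acc (layer n) = acc ++ (List.range (k+1)).flatMap (fun i => layer (n+i)) := by
  induction k with
  | zero => intro acc n; simp [genLoopA]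
  | succ k ih =>
      intro acc n
      show genLoopA k (acc ++ layer n)
          ((layer n).flatMap (fun s => ["a", "b"].map (fun c => s ++ c))) = _
      rw [layer_step, ih (acc ++ layer n) (n+1)]
      simp only [List.range_succ_eq_map, List.flatMap_cons, List.flatMap_map, List.append_assoc]
      simp [Nat.add_comm, Nat.add_left_comm]

theorem layer_one : layer 1 = ["a", "b"] := by decide

-- ===== VERDICT (by name: the statement is the Claim_ definition above) =====
theorem gen_full_testcase_spec : Claim_equal_gen_full_testcase := by
  intro length _
  show gen_full_testcase length = gen_full_testcase_alt length
  rw [gen_full_testcase, gen_full_testcase_alt, ← layer_one,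
    genLoopA_layers ((length - 1).toNat) [] 1, PySem.List.pyRange_one]
  have hM : (max length 1 + 1 - 1).toNat = (length - 1).toNat + 1 := by omega
  rw [hM]
  simp only [List.nil_append, List.flatMap_map]
  refine List.flatMap_congr (fun i hi => ?_)
  have : ((1 : Int) + (i : Int)).toNat = 1 + i := by omega
  rw [this, layer]
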